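-- pv_equiv track=rewrite | github.com/tobiasrausch/blca | cnv_sv_l1/analyze_l1_cna_sv.py | classify_cna_breakpoints
-- ===== SOURCE A (Python) =====
-- def is_near(pos1, chrom1, pos2, chrom2, distance):
--     if chrom1 != chrom2:
--         return False
--     return abs(pos1 - pos2) <= distance
--
-- def classify_cna_breakpoints(cna_breakpoints, sv_breakpoints, distance):
--     sv_explained = []
--     loose_ends = []
--     for cna_chrom, cna_pos in cna_breakpoints:
--         has_sv = False
--         for sv_chrom, sv_pos in sv_breakpoints:
--             if is_near(cna_pos, cna_chrom, sv_pos, sv_chrom, distance):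
--                 has_sv = True
--                 break
--         if has_sv:
--             sv_explained.append((cna_chrom, cna_pos))
--         else:
--             loose_ends.append((cna_chrom, cna_pos))
--     return sv_explained, loose_ends
-- ===== SOURCE B (Python) =====
-- def classify_cna_breakpoints(cna_breakpoints, sv_breakpoints, distance):
--     # Index SV positions by chromosome once, so each CNA breakpoint is only
--     # compared against SV positions on its own chromosome.
--     by_chrom = {}
--     for sv_chrom, sv_pos in sv_breakpoints:
--         by_chrom.setdefault(sv_chrom, []).append(sv_pos)
--     sv_explained = []
--     loose_ends = []
--     for cna_chrom, cna_pos in cna_breakpoints: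
--         if any(abs(cna_pos - q) <= distance for q in by_chrom.get(cna_chrom, [])):
--             sv_explained.append((cna_chrom, cna_pos))
--         else:
--             loose_ends.append((cna_chrom, cna_pos))
--     return sv_explained, loose_ends
-- ===== Notes on version B (the rewrite author's own statement) =====
-- stated objective: faster
-- what changed: B builds a per-chromosome index (dict of SV position lists keyed by chromosome) once, so each CNA breakpoint is checked only against SV positions on its own chromosome instead of A's inner scan over the whole SV list.
import Mathlib
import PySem

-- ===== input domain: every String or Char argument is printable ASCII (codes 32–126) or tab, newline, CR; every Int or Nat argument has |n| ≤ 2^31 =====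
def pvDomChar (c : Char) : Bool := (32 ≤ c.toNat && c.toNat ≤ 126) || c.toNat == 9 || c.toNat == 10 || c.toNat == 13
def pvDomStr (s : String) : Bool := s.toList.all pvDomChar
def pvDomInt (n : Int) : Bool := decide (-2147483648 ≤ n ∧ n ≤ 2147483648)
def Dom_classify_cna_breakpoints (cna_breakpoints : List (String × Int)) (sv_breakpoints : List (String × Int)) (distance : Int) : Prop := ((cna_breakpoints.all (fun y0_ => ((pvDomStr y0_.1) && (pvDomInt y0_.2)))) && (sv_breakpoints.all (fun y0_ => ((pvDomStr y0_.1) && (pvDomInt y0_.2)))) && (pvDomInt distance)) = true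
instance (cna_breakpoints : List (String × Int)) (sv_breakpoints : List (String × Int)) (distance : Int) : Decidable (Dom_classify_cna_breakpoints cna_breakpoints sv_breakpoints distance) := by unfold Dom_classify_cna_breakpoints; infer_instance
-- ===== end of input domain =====

-- ===== PORT A =====
-- B builds a per-chromosome index of SV positions once instead of A's full inner scan; objective: faster.
-- Port of A's helper is_near
def pvIsNear (pos1 : Int) (chrom1 : String) (pos2 : Int) (chrom2 : String) (distance : Int) : Bool :=
  if chrom1 != chrom2 then false
  else decide (|pos1 - pos2| ≤ distance)

-- A's inner 'for … break' loop computing has_sv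
def pvHasSv (cna_chrom : String) (cna_pos : Int) (distance : Int) : List (String × Int) → Bool
  | [] => false
  | (sv_chrom, sv_pos) :: rest =>
      if pvIsNear cna_pos cna_chrom sv_pos sv_chrom distance then true
      else pvHasSv cna_chrom cna_pos distance rest

def classify_cna_breakpoints (cna_breakpoints : List (String × Int)) (sv_breakpoints : List (String × Int)) (distance : Int) : (List (String × Int)) × (List (String × Int)) :=
  cna_breakpoints.foldl
    (fun (acc : List (String × Int) × List (String × Int)) cp =>
      if pvHasSv cp.1 cp.2 distance sv_breakpoints then (acc.1 ++ [cp], acc.2)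
      else (acc.1, acc.2 ++ [cp]))
    ([], [])

-- ===== PORT B =====
-- by_chrom.setdefault(c, []).append(p) == d[k] = d.get(k, []) + [p]: Dict.modify is exactly that
def pvByChrom (sv_breakpoints : List (String × Int)) : PySem.Dict String (List Int) :=
  sv_breakpoints.foldl (fun d p => d.modify p.1 [] (· ++ [p.2])) PySem.Dict.empty

def classify_cna_breakpoints_alt (cna_breakpoints : List (String × Int)) (sv_breakpoints : List (String × Int)) (distance : Int) : (List (String × Int)) × (List (String × Int)) :=
  let by_chrom := pvByChrom sv_breakpoints
  cna_breakpoints.foldl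
    (fun (acc : List (String × Int) × List (String × Int)) cp =>
      if (by_chrom.getD cp.1 []).any (fun q => decide (|cp.2 - q| ≤ distance)) then (acc.1 ++ [cp], acc.2)
      else (acc.1, acc.2 ++ [cp]))
    ([], [])

-- ===== PRECONDITION & SPEC =====
def Spec_classify_cna_breakpoints (cna_breakpoints : List (String × Int)) (sv_breakpoints : List (String × Int)) (distance : Int) (out : (List (String × Int)) × (List (String × Int))) : Prop := out = classify_cna_breakpoints_alt cna_breakpoints sv_breakpoints distance
instance (cna_breakpoints : List (String × Int)) (sv_breakpoints : List (String × Int)) (distance : Int) (out : (List (String × Int)) × (List (String × Int))) : Decidable (Spec_classify_cna_breakpoints cna_breakpoints sv_breakpoints distance out) := by unfold Spec_classify_cna_breakpoints; infer_instance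

-- ===== CLAIM (what is proved, stated in full; the proofs are below) =====
def Claim_equal_classify_cna_breakpoints : Prop := ∀ (cna_breakpoints : List (String × Int)) (sv_breakpoints : List (String × Int)) (distance : Int), Dom_classify_cna_breakpoints cna_breakpoints sv_breakpoints distance → Spec_classify_cna_breakpoints cna_breakpoints sv_breakpoints distance (classify_cna_breakpoints cna_breakpoints sv_breakpoints distance)

-- ===== LEMMAS AND PROOFS =====
lemma hasSv_eq_any (c : String) (p d : Int) (svs : List (String × Int)) :
    pvHasSv c p d svs = ((svs.filter (fun x => x.1 == c)).map (·.2)).any (fun q => decide (|p - q| ≤ d)) := by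
  induction svs with
  | nil => rfl
  | cons hd tl ih =>
    obtain ⟨sc, sp⟩ := hd
    simp only [pvHasSv, pvIsNear, List.filter_cons]
    by_cases h : sc = c
    · subst h
      simp [ih]
    · have h2 : (c != sc) = true := by simp [bne]; exact fun e => h e.symm
      simp [h, h2, ih, List.any_filter, Function.comp]

lemma byChrom_getD (c : String) (svs : List (String × Int)) :
    (pvByChrom svs).getD c [] = (svs.filter (fun x => x.1 == c)).map (·.2) := by
  simpa using PySem.Dict.getD_foldl_modify_append (l := svs) (d := PySem.Dict.empty) (c := c)

lemma step_eq (svs : List (String × Int)) (d : Int) :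
    (fun (acc : List (String × Int) × List (String × Int)) cp =>
      if pvHasSv cp.1 cp.2 d svs then (acc.1 ++ [cp], acc.2)
      else (acc.1, acc.2 ++ [cp]))
    = (fun (acc : List (String × Int) × List (String × Int)) cp =>
      if ((pvByChrom svs).getD cp.1 []).any (fun q => decide (|cp.2 - q| ≤ d)) then (acc.1 ++ [cp], acc.2)
      else (acc.1, acc.2 ++ [cp])) := by
  funext acc cp
  rw [hasSv_eq_any, byChrom_getD]

-- ===== VERDICT (by name: the statement is the Claim_ definition above) =====
theorem classify_cna_breakpoints_spec : Claim_equal_classify_cna_breakpoints := by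
  intro cna svs d _
  unfold Spec_classify_cna_breakpoints classify_cna_breakpoints classify_cna_breakpoints_alt
  rw [step_eq svs d]
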